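-- pv_equiv track=rewrite | github.com/CamiloMans/ADENDA-Generacion-de-preguntas | app/pipeline/extract.py | next_nonempty_line
-- ===== SOURCE A (Python) =====
-- def next_nonempty_line(text, start_pos):
--     i = start_pos
--     n = len(text)
--     while i < n:
--         j = text.find("\n", i)
--         if j == -1:
--             return text[i:].strip()
--         line = text[i:j].strip()
--         if line:
--             return line
--         i = j + 1
--     return ""
-- ===== SOURCE B (Python) =====
-- def next_nonempty_line(text, start_pos):
--     for seg in text[start_pos:].split("\n"):
--         line = seg.strip()
--         if line:
--             return line
--     return ""
-- ===== Notes on version B (the rewrite author's own statement) =====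
-- stated objective: simpler
-- what changed: Replaces the incremental while-loop of find('\n', i)/slice/strip steps with a single slice of the remaining text, one split('\n'), and a plain first-non-empty-after-strip scan over the segments.
import Mathlib
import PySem

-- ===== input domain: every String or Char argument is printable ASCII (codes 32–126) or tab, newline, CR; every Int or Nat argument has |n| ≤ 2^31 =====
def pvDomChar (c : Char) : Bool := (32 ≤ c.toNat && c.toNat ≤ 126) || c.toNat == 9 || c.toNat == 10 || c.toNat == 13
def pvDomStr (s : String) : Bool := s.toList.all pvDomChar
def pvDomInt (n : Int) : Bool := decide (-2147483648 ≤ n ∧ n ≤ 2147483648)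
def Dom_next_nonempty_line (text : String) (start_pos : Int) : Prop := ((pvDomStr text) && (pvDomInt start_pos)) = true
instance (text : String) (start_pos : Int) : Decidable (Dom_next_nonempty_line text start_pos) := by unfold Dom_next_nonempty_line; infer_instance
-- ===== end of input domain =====

-- B replaces A's incremental find('\n')/slice/strip while-loop by one slice of the rest, one
-- split('\n'), and a first-non-empty-after-strip scan over the segments (objective: simpler).

-- ===== PORT A =====
-- termination helper cited by the port: text.find(sub, i) never returns a hit left of i
theorem pvFindFrom_start_le (s sub : List Char) (i : Int)
    (h : PySem.Chars.findFrom s sub i none ≠ -1) : i ≤ PySem.Chars.findFrom s sub i none := by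
  simp only [PySem.Chars.findFrom] at h ⊢
  have h0 := PySem.Chars.neg_one_le_find
    (List.drop (if i < 0 then if i + ↑s.length < 0 then 0 else i + ↑s.length else i).toNat
      (List.take (↑s.length : Int).toNat s)) sub
  split_ifs at * <;> omega

-- A's while-loop: i, n = len(text); find('\n', i); return text[i:].strip() when absent;
-- line = text[i:j].strip(); return it if truthy; else i = j + 1.
def nelLoop (s : List Char) (i : Int) : List Char :=
  if _h : i < (s.length : Int) then
    let j := PySem.Chars.findFrom s ['\n'] i none
    if _hj : j = -1 then
      PySem.Chars.strip (PySem.List.slice s (some i) none)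
    else
      let line := PySem.Chars.strip (PySem.List.slice s (some i) (some j))
      if line ≠ [] then line else nelLoop s (j + 1)
  else []
termination_by ((s.length : Int) - i).toNat
decreasing_by
  have := pvFindFrom_start_le s ['\n'] i _hj
  omega

def next_nonempty_line (text : String) (start_pos : Int) : String :=
  String.ofList (nelLoop text.toList start_pos)

-- ===== PORT B =====
-- the for-loop of Source B over the segments: strip each, return the first non-empty
def firstSeg : List (List Char) → List Char
  | [] => []
  | seg :: t =>
    let line := PySem.Chars.strip seg
    if line ≠ [] then line else firstSeg t

-- rest = text[start_pos:]; scan rest.split("\n")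
def next_nonempty_line_alt (text : String) (start_pos : Int) : String :=
  String.ofList (firstSeg (PySem.Chars.splitOn (PySem.List.slice text.toList (some start_pos) none) ['\n']))

-- ===== PRECONDITION & SPEC =====
def Spec_next_nonempty_line (text : String) (start_pos : Int) (out : String) : Prop := out = next_nonempty_line_alt text start_pos
instance (text : String) (start_pos : Int) (out : String) : Decidable (Spec_next_nonempty_line text start_pos out) := by unfold Spec_next_nonempty_line; infer_instance

-- ===== CLAIM (what is proved, stated in full; the proofs are below) =====
def Claim_equal_next_nonempty_line : Prop := ∀ (text : String) (start_pos : Int), Dom_next_nonempty_line text start_pos → Spec_next_nonempty_line text start_pos (next_nonempty_line text start_pos)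

-- ===== LEMMAS AND PROOFS =====

-- reference splitter: split a character list at every '\n'
def splitNL : List Char → List (List Char)
  | [] => [[]]
  | c :: rest => if c = '\n' then [] :: splitNL rest else (splitNL rest).modifyHead (c :: ·)

theorem splitNL_ne_nil (l : List Char) : splitNL l ≠ [] := by
  cases l with
  | nil => simp [splitNL]
  | cons c rest =>
    simp only [splitNL]
    split_ifs <;> simp [List.modifyHead]
    cases h : splitNL rest with
    | nil => exact absurd h (splitNL_ne_nil rest)
    | cons a t => simp

theorem splitOn_go_eq (fuel : Nat) (l cur : List Char) (acc : List (List Char))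
    (hf : l.length < fuel) :
    PySem.Chars.splitOn.go ['\n'] fuel l cur acc
      = acc.reverse ++ (splitNL l).modifyHead (cur.reverse ++ ·) := by
  induction fuel generalizing l cur acc with
  | zero => omega
  | succ f ih =>
    cases l with
    | nil => simp [PySem.Chars.splitOn.go, splitNL]
    | cons c rest =>
      by_cases hc : c = '\n'
      · subst hc
        have : PySem.Chars.splitOn.go ['\n'] (f+1) ('\n' :: rest) cur acc
            = PySem.Chars.splitOn.go ['\n'] f rest [] (cur.reverse :: acc) := by
          simp [PySem.Chars.splitOn.go, List.isPrefixOf]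
        rw [this, ih rest [] (cur.reverse :: acc) (by simpa using Nat.lt_of_succ_lt_succ hf)]
        simp only [splitNL, if_pos]
        cases hsr : splitNL rest with
        | nil => exact absurd hsr (splitNL_ne_nil rest)
        | cons a tl => simp [List.modifyHead]
      · have : PySem.Chars.splitOn.go ['\n'] (f+1) (c :: rest) cur acc
            = PySem.Chars.splitOn.go ['\n'] f rest (c :: cur) acc := by
          simp [PySem.Chars.splitOn.go, List.isPrefixOf, Ne.symm hc]
        rw [this, ih rest (c :: cur) acc (by simpa using Nat.lt_of_succ_lt_succ hf)]
        simp only [splitNL, if_neg hc]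
        cases h : splitNL rest with
        | nil => exact absurd h (splitNL_ne_nil rest)
        | cons a t => simp [List.modifyHead]

theorem splitOn_eq_splitNL (l : List Char) : PySem.Chars.splitOn l ['\n'] = splitNL l := by
  unfold PySem.Chars.splitOn
  rw [splitOn_go_eq (l.length + 1) l [] [] (by omega)]
  cases h : splitNL l with
  | nil => exact absurd h (splitNL_ne_nil l)
  | cons a t => simp [List.modifyHead]

theorem splitNL_of_not_mem (l : List Char) (h : '\n' ∉ l) : splitNL l = [l] := by
  induction l with
  | nil => simp [splitNL]
  | cons c rest ih =>
    simp only [List.mem_cons, not_or] at h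
    simp [splitNL, Ne.symm h.1, ih h.2, List.modifyHead]

theorem splitNL_append (pre rest : List Char) (h : '\n' ∉ pre) :
    splitNL (pre ++ '\n' :: rest) = pre :: splitNL rest := by
  induction pre with
  | nil => simp [splitNL]
  | cons c p ih =>
    simp only [List.mem_cons, not_or] at h
    simp only [List.cons_append, splitNL, if_neg (Ne.symm h.1 : c ≠ '\n'), ih h.2, List.modifyHead]

-- what text.find("\n", i) computes for i < len(text): clamp i, then the first '\n' at or after it
theorem findFrom_eq_of_lt (s sub : List Char) (i : Int) (hi : i < (s.length : Int)) :
    PySem.Chars.findFrom s sub i none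
      = (if PySem.Chars.find (s.drop (PySem.List.clampIdx s.length i)) sub = -1 then -1
         else (PySem.List.clampIdx s.length i : Int)
              + PySem.Chars.find (s.drop (PySem.List.clampIdx s.length i)) sub) := by
  simp only [PySem.Chars.findFrom, PySem.List.clampIdx, Int.toNat_natCast, List.take_length]
  by_cases h0 : i < 0
  · by_cases h1 : i + (s.length : Int) < 0
    · simp only [if_pos h0, if_pos h1, if_pos (show (s.length:Int) + i < 0 by omega)]
      rw [if_neg (show ¬((s.length:Int) < (0:Int)) by omega)]
      simp
    · simp only [if_pos h0, if_neg h1, if_neg (show ¬((s.length:Int) + i < 0) by omega)]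
      rw [if_neg (show ¬((s.length:Int) < i + (s.length:Int)) by omega)]
      rw [show (i + (s.length:Int)).toNat = ((s.length:Int) + i).toNat by omega]
      simp only [Int.toNat_of_nonneg (show (0:Int) ≤ (s.length:Int)+i by omega)]
      split_ifs <;> omega
  · simp only [if_neg h0]
    rw [if_neg (show ¬((s.length:Int) < i) by omega)]
    rw [show min i.toNat s.length = i.toNat by omega]
    simp only [Int.toNat_of_nonneg (show (0:Int) ≤ i by omega)]

-- the loop of A computes B's scan over the segments of the remaining text
theorem nelLoop_eq (s : List Char) (i : Int) :
    nelLoop s i = firstSeg (splitNL (s.drop (PySem.List.clampIdx s.length i))) := by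
  have H : ∀ (fuel : Nat) (i : Int), ((s.length : Int) - i).toNat ≤ fuel →
      nelLoop s i = firstSeg (splitNL (s.drop (PySem.List.clampIdx s.length i))) := by
    intro fuel
    induction fuel with
    | zero =>
      intro i hle
      have hni : ¬ i < (s.length : Int) := by omega
      rw [nelLoop, dif_neg hni]
      have hk : PySem.List.clampIdx s.length i = s.length := by
        unfold PySem.List.clampIdx
        split_ifs <;> omega
      rw [hk, List.drop_length]
      simp only [splitNL, firstSeg]
      have : PySem.Chars.strip ([] : List Char) = [] := by decide
      simp [this]
    | succ f ih =>
      intro i hle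
      by_cases hi : i < (s.length : Int)
      case neg =>
        rw [nelLoop, dif_neg hi]
        have hk : PySem.List.clampIdx s.length i = s.length := by
          unfold PySem.List.clampIdx
          split_ifs <;> omega
        rw [hk, List.drop_length]
        simp only [splitNL, firstSeg]
        have : PySem.Chars.strip ([] : List Char) = [] := by decide
        simp [this]
      case pos =>
        set k := PySem.List.clampIdx s.length i with hkdef
        have hk0 : k ≤ s.length := by
          rw [hkdef]; unfold PySem.List.clampIdx; split_ifs <;> omega
        have hik : i ≤ (k : Int) := by
          rw [hkdef]; unfold PySem.List.clampIdx; split_ifs <;> omega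
        set t := s.drop k with htdef
        have hfind := findFrom_eq_of_lt s ['\n'] i hi
        rw [nelLoop, dif_pos hi]
        simp only [← hkdef, ← htdef] at hfind
        by_cases hm : PySem.Chars.find t ['\n'] = -1
        · have hj : PySem.Chars.findFrom s ['\n'] i none = -1 := by rw [hfind, if_pos hm]
          simp only [hj]
          rw [PySem.List.slice_some_none, ← hkdef, ← htdef]
          have hmem : '\n' ∉ t := by
            rw [PySem.Chars.find_eq_neg_one_iff] at hm
            intro hc; exact hm ((List.singleton_infix_iff '\n' t).mpr hc)
          rw [splitNL_of_not_mem t hmem]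
          simp only [firstSeg]
          split_ifs with h <;> simp_all
        · set m := PySem.Chars.find t ['\n'] with hmdef
          have hm0 : 0 ≤ m := by
            have := PySem.Chars.neg_one_le_find t ['\n']
            rw [← hmdef] at this; omega
          have hspec := PySem.Chars.find_spec (s := t) (sub := ['\n']) (by rw [← hmdef]; exact hm0)
          rw [← hmdef] at hspec
          obtain ⟨hpre, hmin⟩ := hspec
          have hdropm : t.drop m.toNat = '\n' :: t.drop (m.toNat + 1) := by
            obtain ⟨u, hu⟩ := hpre
            have hu' : t.drop m.toNat = '\n' :: u := by rw [← hu]; rfl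
            have h2 : t.drop (m.toNat + 1) = u := by
              have h3 : (t.drop m.toNat).tail = u := by simp [hu']
              rwa [List.tail_drop] at h3
            rw [hu', h2]
          have hmlt : m.toNat < t.length := by
            by_contra hc
            have hnil : t.drop m.toNat = [] := List.drop_eq_nil_of_le (by omega)
            rw [hdropm] at hnil; exact List.cons_ne_nil _ _ hnil
          have htlen : t.length = s.length - k := by rw [htdef, List.length_drop]
          have hj : PySem.Chars.findFrom s ['\n'] i none = (k : Int) + m := by
            rw [hfind, if_neg hm]
          simp only [hj]
          rw [dif_neg (by omega : ¬ ((k : Int) + m = -1))]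
          have hslice : PySem.List.slice s (some i) (some ((k : Int) + m)) = t.take m.toNat := by
            simp only [PySem.List.slice, ← hkdef]
            have hc2 : PySem.List.clampIdx s.length ((k : Int) + m) = k + m.toNat := by
              unfold PySem.List.clampIdx; split_ifs <;> omega
            rw [hc2, show k + m.toNat - k = m.toNat from by omega, ← htdef]
          rw [hslice]
          have hnotmem : '\n' ∉ t.take m.toNat := by
            intro hc
            obtain ⟨p, hp, hget⟩ := List.getElem_of_mem hc
            have hplen : p < t.length := by
              have := List.length_take (l := t) (i := m.toNat); omega
            have hpm : p < m.toNat := by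
              have := List.length_take (l := t) (i := m.toNat); omega
            have hgt : t[p] = '\n' := by
              rw [← hget, List.getElem_take]
            refine hmin p hpm ⟨t.drop (p + 1), ?_⟩
            rw [List.drop_eq_getElem_cons hplen, hgt]
            rfl
          have ht : t = t.take m.toNat ++ '\n' :: t.drop (m.toNat + 1) := by
            conv_lhs => rw [← List.take_append_drop m.toNat t]
            rw [hdropm]
          have hsplit : splitNL t = t.take m.toNat :: splitNL (t.drop (m.toNat + 1)) := by
            conv_lhs => rw [ht]
            exact splitNL_append _ _ hnotmem
          rw [hsplit]
          simp only [firstSeg]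
          split_ifs with hline
          · rfl
          · rw [ih ((k : Int) + m + 1) (by omega)]
            have hc3 : PySem.List.clampIdx s.length ((k : Int) + m + 1) = k + (m.toNat + 1) := by
              unfold PySem.List.clampIdx; split_ifs <;> omega
            rw [hc3, ← List.drop_drop, ← htdef]
  exact H _ i le_rfl

-- ===== VERDICT (by name: the statement is the Claim_ definition above) =====
theorem next_nonempty_line_spec : Claim_equal_next_nonempty_line := by
  intro text start_pos _
  unfold Spec_next_nonempty_line next_nonempty_line next_nonempty_line_alt
  rw [PySem.List.slice_some_none, splitOn_eq_splitNL, nelLoop_eq]
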